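-- pv_equiv track=rewrite | github.com/svwk/mlops2_4 | scripts/data_scripts/utils/seniority_cats.py | months_seniority_to_new_cat
-- ===== SOURCE A (Python) =====
-- DEFAULT_CAT = 'Нет стажа'
--
-- NEW_SENIORITY_VALUES = {
--     'Нет стажа': range(0, 1),
--     'Менее 6 месяцев': range(1, 6),
--     'Менее 2 лет': range(6, 24),
--     'Менее 5 лет': range(24, 60),
--     'Менее 10 лет': range(60, 120),
--     '10 и более лет': range(120, 1000),
-- }
--
-- def months_seniority_to_new_cat(numeric_value):
--     """
--     Конвертация числового значения стажа в строковое
--     представление новой категории стажа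
--     :param numeric_value: стаж (количество месяцев)
--     :return строковое представление новой категории стажа
--     """
--     if numeric_value is None:
--         return None
--
--     numeric_value = int(numeric_value)
--
--     for key, value_range in NEW_SENIORITY_VALUES.items():
--         if numeric_value in value_range:
--             return key
--
--     return DEFAULT_CAT
-- ===== SOURCE B (Python) =====
-- import bisect
--
-- DEFAULT_CAT = 'Нет стажа'
--
-- _BOUNDS = [1, 6, 24, 60, 120, 1000]
-- _CATS = ['Нет стажа', 'Менее 6 месяцев', 'Менее 2 лет',
--          'Менее 5 лет', 'Менее 10 лет', '10 и более лет']
--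
--
-- def months_seniority_to_new_cat(numeric_value):
--     if numeric_value is None:
--         return None
--     i = bisect.bisect_right(_BOUNDS, int(numeric_value))
--     return _CATS[i] if i < len(_CATS) else DEFAULT_CAT
-- ===== Notes on version B (the rewrite author's own statement) =====
-- stated objective: idiomatic
-- what changed: Replaces the linear scan over six range objects in a dict with a binary search (bisect_right) over an ascending boundary list paired with a parallel category list.
import Mathlib
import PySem

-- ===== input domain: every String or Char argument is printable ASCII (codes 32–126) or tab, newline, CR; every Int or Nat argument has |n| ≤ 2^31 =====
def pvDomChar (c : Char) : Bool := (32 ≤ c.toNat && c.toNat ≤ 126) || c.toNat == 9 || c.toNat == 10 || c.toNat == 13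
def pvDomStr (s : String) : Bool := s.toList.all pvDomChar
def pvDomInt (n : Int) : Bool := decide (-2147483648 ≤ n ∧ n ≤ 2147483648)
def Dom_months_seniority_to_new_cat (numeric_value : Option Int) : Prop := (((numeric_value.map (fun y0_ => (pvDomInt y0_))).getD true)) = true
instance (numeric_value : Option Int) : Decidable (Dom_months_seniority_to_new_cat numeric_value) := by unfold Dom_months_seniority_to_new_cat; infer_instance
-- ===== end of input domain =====

-- B replaces A's linear scan over six dict ranges with bisect_right over a boundary list (idiomatic).
-- ===== PORT A =====
-- the dict NEW_SENIORITY_VALUES as an insertion-order list of (key, (lo, hi)) with range(lo, hi)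
def pvSeniorityPairs : List (String × Int × Int) :=
  [("Нет стажа", (0, 1)), ("Менее 6 месяцев", (1, 6)), ("Менее 2 лет", (6, 24)),
   ("Менее 5 лет", (24, 60)), ("Менее 10 лет", (60, 120)), ("10 и более лет", (120, 1000))]

-- the for-loop over the dict items: first key whose range contains n, else DEFAULT_CAT
def pvSeniorityScan (n : Int) : List (String × Int × Int) → String
  | [] => "Нет стажа"
  | (key, lo, hi) :: rest => if lo ≤ n ∧ n < hi then key else pvSeniorityScan n rest

def months_seniority_to_new_cat (numeric_value : Option Int) : Option String :=
  match numeric_value with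
  | none => none
  | some n => some (pvSeniorityScan n pvSeniorityPairs)

-- ===== PORT B =====
def pvBounds : List Int := [1, 6, 24, 60, 120, 1000]
def pvCats : List String :=
  ["Нет стажа", "Менее 6 месяцев", "Менее 2 лет", "Менее 5 лет", "Менее 10 лет", "10 и более лет"]

def months_seniority_to_new_cat_alt (numeric_value : Option Int) : Option String :=
  match numeric_value with
  | none => none
  | some n =>
    let i := PySem.List.bisectRight pvBounds n
    some (if i < pvCats.length then pvCats.getD i "" else "Нет стажа")

-- ===== PRECONDITION & SPEC =====
def Spec_months_seniority_to_new_cat (numeric_value : Option Int) (out : Option String) : Prop := out = months_seniority_to_new_cat_alt numeric_value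
instance (numeric_value : Option Int) (out : Option String) : Decidable (Spec_months_seniority_to_new_cat numeric_value out) := by unfold Spec_months_seniority_to_new_cat; infer_instance

-- ===== CLAIM (what is proved, stated in full; the proofs are below) =====
def Claim_equal_months_seniority_to_new_cat : Prop := ∀ (numeric_value : Option Int), Dom_months_seniority_to_new_cat numeric_value → Spec_months_seniority_to_new_cat numeric_value (months_seniority_to_new_cat numeric_value)

-- ===== LEMMAS AND PROOFS =====

-- bisect_right over the literal boundary list, as a case split on n
theorem pvBisect_val (n : Int) :
    PySem.List.bisectRight pvBounds n =
      if n < 1 then 0 else if n < 6 then 1 else if n < 24 then 2 else if n < 60 then 3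
      else if n < 120 then 4 else if n < 1000 then 5 else 6 := by
  obtain ⟨h1, h2, h3⟩ := PySem.List.bisectRight_spec pvBounds n (by decide)
  set i := PySem.List.bisectRight pvBounds n with hi
  have len : pvBounds.length = 6 := by decide
  rw [len] at h1
  have g0 : 0 < i → (1:Int) ≤ n := fun h => by simpa using h2 0 (by simp [pvBounds]) h
  have g1 : 1 < i → (6:Int) ≤ n := fun h => by simpa using h2 1 (by simp [pvBounds]) h
  have g2 : 2 < i → (24:Int) ≤ n := fun h => by simpa using h2 2 (by simp [pvBounds]) h
  have g3 : 3 < i → (60:Int) ≤ n := fun h => by simpa using h2 3 (by simp [pvBounds]) h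
  have g4 : 4 < i → (120:Int) ≤ n := fun h => by simpa using h2 4 (by simp [pvBounds]) h
  have g5 : 5 < i → (1000:Int) ≤ n := fun h => by simpa using h2 5 (by simp [pvBounds]) h
  have k0 : i ≤ 0 → n < 1 := fun h => by simpa using h3 0 (by simp [pvBounds]) h
  have k1 : i ≤ 1 → n < 6 := fun h => by simpa using h3 1 (by simp [pvBounds]) h
  have k2 : i ≤ 2 → n < 24 := fun h => by simpa using h3 2 (by simp [pvBounds]) h
  have k3 : i ≤ 3 → n < 60 := fun h => by simpa using h3 3 (by simp [pvBounds]) h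
  have k4 : i ≤ 4 → n < 120 := fun h => by simpa using h3 4 (by simp [pvBounds]) h
  have k5 : i ≤ 5 → n < 1000 := fun h => by simpa using h3 5 (by simp [pvBounds]) h
  split_ifs <;> omega

-- ===== VERDICT (by name: the statement is the Claim_ definition above) =====
theorem months_seniority_to_new_cat_spec : Claim_equal_months_seniority_to_new_cat := by
  intro nv _
  unfold Spec_months_seniority_to_new_cat
  match nv with
  | none => rfl
  | some n =>
    have hb := pvBisect_val n
    split_ifs at hb with h1 h2 h3 h4 h5 h6 <;>
      simp [months_seniority_to_new_cat, months_seniority_to_new_cat_alt, hb,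
            pvSeniorityPairs, pvSeniorityScan, pvCats] <;> split_ifs <;> first | rfl | omega | simp_all
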